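-- pv_equiv track=rewrite | github.com/nadxelleHernandez/algorithm_practice | algorithm_practice/hash_tables/hash_algorithms.py | server_failures
-- ===== SOURCE A (Python) =====
-- def server_failures(logs: [str]):
--     '''
--     Given n number of servers, tell how many time had they needed to be restarted. A server is restarted when it fails three times. This failures can be located on the
--     logs array as: s1 failed for server 1, s2 failed for server 2 etc.
--     '''
--
--     failure_dict = {}
--     for s in logs:
--         if "failed" in s:
--             if s in failure_dict:
--                 failure_dict[s] += 1
--             else:
--                 failure_dict[s] = 1
--
--     times_failed = 0
--     for fail in failure_dict.values():
--         if fail >= 3: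
--             times_failed += fail // 3
--
--     return times_failed
-- ===== SOURCE B (Python) =====
-- def server_failures(logs: [str]):
--     # Single pass: count each 'failed' log line; every time a line's count
--     # reaches a multiple of 3, one more restart has happened.
--     counts = {}
--     times_failed = 0
--     for s in logs:
--         if "failed" in s:
--             c = counts.get(s, 0) + 1
--             counts[s] = c
--             if c % 3 == 0:
--                 times_failed += 1
--     return times_failed
-- ===== Notes on version B (the rewrite author's own statement) =====
-- stated objective: simpler
-- what changed: B folds the restart count into the single counting pass (increment a dict count and add 1 whenever the new count hits a multiple of 3), removing A's separate second loop over dict values that sums fail // 3.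
import Mathlib
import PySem

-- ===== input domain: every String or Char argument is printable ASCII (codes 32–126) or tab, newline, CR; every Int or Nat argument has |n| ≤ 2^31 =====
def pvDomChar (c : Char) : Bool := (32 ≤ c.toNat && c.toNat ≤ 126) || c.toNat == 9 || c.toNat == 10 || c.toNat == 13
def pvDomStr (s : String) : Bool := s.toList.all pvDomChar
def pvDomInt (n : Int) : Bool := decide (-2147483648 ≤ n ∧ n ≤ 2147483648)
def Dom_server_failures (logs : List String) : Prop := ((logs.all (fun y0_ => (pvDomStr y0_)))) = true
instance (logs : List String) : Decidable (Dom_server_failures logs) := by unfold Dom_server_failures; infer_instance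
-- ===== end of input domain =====

-- B replaces A's two-pass scheme (count dict, then sum fail // 3 over values) by a
-- single pass that adds 1 whenever a line's count reaches a multiple of 3 (simpler).

-- ===== PORT A =====
def server_failures (logs : List String) : Int :=
  let failure_dict :=
    logs.foldl (fun d s =>
      if PySem.Str.isIn "failed" s then
        if d.contains s then d.insert s (d.getD s 0 + 1)  -- failure_dict[s] += 1 (key present)
        else d.insert s 1
      else d) (PySem.Dict.empty : PySem.Dict String Int)
  failure_dict.values.foldl (fun t fail =>
    if 3 ≤ fail then t + PySem.Int.floordiv fail 3 else t) 0

-- ===== PORT B =====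
def server_failures_alt (logs : List String) : Int :=
  (logs.foldl (fun (st : PySem.Dict String Int × Int) s =>
      if PySem.Str.isIn "failed" s then
        let c := st.1.getD s 0 + 1
        (st.1.insert s c, if PySem.Int.mod c 3 == 0 then st.2 + 1 else st.2)
      else st) (PySem.Dict.empty, 0)).2

-- ===== PRECONDITION & SPEC =====
def Spec_server_failures (logs : List String) (out : Int) : Prop := out = server_failures_alt logs
instance (logs : List String) (out : Int) : Decidable (Spec_server_failures logs out) := by unfold Spec_server_failures; infer_instance

-- ===== CLAIM (what is proved, stated in full; the proofs are below) =====
def Claim_equal_server_failures : Prop := ∀ (logs : List String), Dom_server_failures logs → Spec_server_failures logs (server_failures logs)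

-- ===== LEMMAS AND PROOFS =====

-- restart contribution of one count
def pvF (v : Int) : Int := if 3 ≤ v then PySem.Int.floordiv v 3 else 0

theorem pvF_step (c : Int) (hc : 0 ≤ c) :
    pvF (c + 1) = pvF c + (if PySem.Int.mod (c + 1) 3 == 0 then 1 else 0) := by
  unfold pvF
  rw [PySem.Int.mod_eq_emod_of_pos (by norm_num : (0:Int) < 3)]
  by_cases h3 : 3 ≤ c + 1
  · rw [PySem.Int.floordiv_eq_ediv_of_pos (by norm_num : (0:Int) < 3), if_pos h3]
    by_cases h3' : 3 ≤ c
    · rw [if_pos h3', PySem.Int.floordiv_eq_ediv_of_pos (by norm_num : (0:Int) < 3)]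
      split <;> rename_i hm <;> simp only [beq_iff_eq] at hm <;> omega
    · rw [if_neg h3']
      split <;> rename_i hm <;> simp only [beq_iff_eq] at hm <;> omega
  · rw [if_neg h3, if_neg (by omega : ¬ 3 ≤ c)]
    split <;> rename_i hm <;> simp only [beq_iff_eq] at hm <;> omega

theorem pvSum_foldl (l : List Int) (a : Int) :
    l.foldl (fun t fail => if 3 ≤ fail then t + PySem.Int.floordiv fail 3 else t) a
      = a + (l.map pvF).sum := by
  induction l generalizing a with
  | nil => simp
  | cons x xs ih =>
    simp only [List.foldl_cons, List.map_cons, List.sum_cons, ih]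
    unfold pvF
    split <;> ring

-- replacing the (unique) entry with key k and value c by (k, v) changes the sum by pvF v - pvF c
theorem pvSum_replace (l : List (String × Int)) (k : String) (c v : Int)
    (hnd : (l.map Prod.fst).Nodup) (hm : (k, c) ∈ l) :
    ((l.map (fun p => if p.1 == k then (k, v) else p)).map (fun p => pvF p.2)).sum
      = (l.map (fun p => pvF p.2)).sum + pvF v - pvF c := by
  induction l with
  | nil => simp at hm
  | cons p ps ih =>
    simp only [List.map_cons, List.nodup_cons] at hnd
    rcases List.mem_cons.mp hm with h | h
    · subst h
      have h0 : ∀ q ∈ ps, (if q.1 == k then ((k, v) : String × Int) else q) = id q := by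
        intro q hq
        have hqk : q.1 ≠ k := fun he => hnd.1 (List.mem_map.mpr ⟨q, hq, he⟩)
        simp [hqk]
      simp only [List.map_cons, List.sum_cons, beq_self_eq_true, if_true,
        List.map_congr_left h0, List.map_id]
      ring
    · have hpk : p.1 ≠ k := fun he => hnd.1 (List.mem_map.mpr ⟨(k, c), h, he.symm⟩)
      have hif : (if p.1 == k then ((k, v) : String × Int) else p) = p := by simp [hpk]
      simp only [List.map_cons, List.sum_cons, hif, ih hnd.2 h]
      ring

-- main invariant: B's running total tracks the pvF-sum over A's dict values
theorem pvInv (logs : List String) :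
    ∀ (d : PySem.Dict String Int) (t : Int),
      d.keys.Nodup → (∀ v ∈ d.values, 0 ≤ v) →
      t = (d.values.map pvF).sum →
      (logs.foldl (fun (st : PySem.Dict String Int × Int) s =>
          if PySem.Str.isIn "failed" s then
            let c := st.1.getD s 0 + 1
            (st.1.insert s c, if PySem.Int.mod c 3 == 0 then st.2 + 1 else st.2)
          else st) (d, t)).2
        = ((logs.foldl (fun d s =>
            if PySem.Str.isIn "failed" s then
              if d.contains s then d.insert s (d.getD s 0 + 1) else d.insert s 1
            else d) d).values.map pvF).sum := by
  induction logs with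
  | nil => intro d t _ _ ht; simpa using ht
  | cons s rest ih =>
    intro d t hnd hpos ht
    simp only [List.foldl_cons]
    by_cases hin : PySem.Str.isIn "failed" s
    · simp only [if_pos hin]
      by_cases hc : d.contains s
      · -- key present: entry c0 becomes c0 + 1
        simp only [if_pos hc]
        obtain ⟨c0, hget⟩ : ∃ c0, d.get? s = some c0 := by
          have h := PySem.Dict.contains_eq_isSome_get? d s
          rw [hc] at h
          exact Option.isSome_iff_exists.mp h.symm
        have hgd : d.getD s 0 = c0 := PySem.Dict.getD_of_get?_eq_some d 0 hget
        have hmem : (s, c0) ∈ d.items := PySem.Dict.mem_items_of_get?_eq_some d hget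
        have hc0 : 0 ≤ c0 := by
          apply hpos
          simp only [PySem.Dict.values, List.mem_map]
          exact ⟨(s, c0), hmem, rfl⟩
        apply ih
        · exact PySem.Dict.nodup_keys_insert d s _ hnd
        · intro v hv
          rcases PySem.Dict.mem_values_insert d s _ v hv with h | h
          · rw [h, hgd]; omega
          · exact hpos v h
        · -- new sum = old sum + pvF (c0+1) - pvF c0
          have hitems := PySem.Dict.items_insert_of_contains d (d.getD s 0 + 1) hc
          have hvals : (d.insert s (d.getD s 0 + 1)).values
              = (d.items.map (fun p => if p.1 == s then (s, d.getD s 0 + 1) else p)).map Prod.snd := by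
            simp only [PySem.Dict.values, hitems]
          rw [hvals, hgd]
          have hrep := pvSum_replace d.items s c0 (c0 + 1) hnd hmem
          have hrw : ((d.items.map (fun p => if p.1 == s then (s, c0 + 1) else p)).map Prod.snd).map pvF
              = (d.items.map (fun p => if p.1 == s then (s, c0 + 1) else p)).map (fun p => pvF p.2) := by
            simp [List.map_map, Function.comp]
          rw [hrw, hrep]
          have hsum : (d.items.map (fun p => pvF p.2)).sum = (d.values.map pvF).sum := by
            simp [PySem.Dict.values, List.map_map, Function.comp_def]
          rw [hsum, ← ht, pvF_step c0 hc0]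
          split <;> ring
      · -- key absent: getD = 0, new value 1, pvF 1 = 0, total unchanged
        have hcf : d.contains s = false := by simpa using hc
        have hgd : d.getD s 0 = 0 := PySem.Dict.getD_of_not_contains d 0 hcf
        simp only [if_neg hc, hgd]
        have h01 : (0 : Int) + 1 = 1 := rfl
        rw [h01, if_neg (by decide : ¬ (PySem.Int.mod (1:Int) 3 == 0) = true)]
        apply ih
        · exact PySem.Dict.nodup_keys_insert d s 1 hnd
        · intro v hv
          rcases PySem.Dict.mem_values_insert d s 1 v hv with h | h
          · rw [h]; omega
          · exact hpos v h
        · have hitems := PySem.Dict.items_insert_of_not_contains d (1:Int) hcf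
          have hvals : (d.insert s (1:Int)).values = d.values ++ [(1:Int)] := by
            simp [PySem.Dict.values, hitems]
          rw [hvals, ht]
          simp [pvF]
    · simp only [if_neg hin]
      exact ih d t hnd hpos ht

-- ===== VERDICT (by name: the statement is the Claim_ definition above) =====
theorem server_failures_spec : Claim_equal_server_failures := by
  intro logs _
  unfold Spec_server_failures server_failures server_failures_alt
  rw [pvSum_foldl]
  rw [pvInv logs PySem.Dict.empty 0 (by simp [PySem.Dict.keys, PySem.Dict.empty])
    (by simp [PySem.Dict.values, PySem.Dict.empty]) (by simp [PySem.Dict.values, PySem.Dict.empty])]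
  simp
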